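-- pv_equiv track=rewrite | github.com/get2knowio/maverick | src/maverick/workflows/fly_beads/_plan_parsing.py | _parse_file_scope
-- ===== SOURCE A (Python) =====
-- def _parse_file_scope(
--     file_scope_text: str,
-- ) -> tuple[list[str], list[str], list[str]]:
--     """Parse ``## File Scope`` into create, modify, protect lists."""
--     create: list[str] = []
--     modify: list[str] = []
--     protect: list[str] = []
--
--     current = None
--     for line in file_scope_text.split("\n"):
--         stripped = line.strip()
--         low = stripped.lower()
--         if low.startswith("### create"):
--             current = create
--         elif low.startswith("### modify"):
--             current = modify
--         elif low.startswith("### protect"):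
--             current = protect
--         elif stripped.startswith("- ") and current is not None:
--             current.append(stripped[2:].strip())
--
--     return create, modify, protect
-- ===== SOURCE B (Python) =====
-- def _parse_file_scope(
--     file_scope_text: str,
-- ) -> tuple[list[str], list[str], list[str]]:
--     """Parse ``## File Scope`` into create, modify, protect lists."""
--     headers = (("### create", 0), ("### modify", 1), ("### protect", 2))
--
--     # Pass 1: split the lines into tagged section blocks; lines before the
--     # first recognised header belong to no block and are dropped.
--     blocks: list[tuple[int, list[str]]] = []
--     for line in file_scope_text.split("\n"):
--         stripped = line.strip()
--         low = stripped.lower()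
--         tag = next((t for h, t in headers if low.startswith(h)), None)
--         if tag is not None:
--             blocks.append((tag, []))
--         elif blocks:
--             blocks[-1][1].append(stripped)
--
--     # Pass 2: pull the bullet items out of each block into its result list.
--     results: tuple[list[str], list[str], list[str]] = ([], [], [])
--     for tag, lines in blocks:
--         results[tag].extend(s[2:].strip() for s in lines if s.startswith("- "))
--     return results
-- ===== Notes on version B (the rewrite author's own statement) =====
-- stated objective: alternative
-- what changed: Replaces A's single stateful scan (a 'current' list alias mutated per line) with a two-pass pipeline: pass 1 splits the lines into tagged section blocks via a header table, pass 2 filters/maps each block's bullet lines into the matching result list.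
import Mathlib
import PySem

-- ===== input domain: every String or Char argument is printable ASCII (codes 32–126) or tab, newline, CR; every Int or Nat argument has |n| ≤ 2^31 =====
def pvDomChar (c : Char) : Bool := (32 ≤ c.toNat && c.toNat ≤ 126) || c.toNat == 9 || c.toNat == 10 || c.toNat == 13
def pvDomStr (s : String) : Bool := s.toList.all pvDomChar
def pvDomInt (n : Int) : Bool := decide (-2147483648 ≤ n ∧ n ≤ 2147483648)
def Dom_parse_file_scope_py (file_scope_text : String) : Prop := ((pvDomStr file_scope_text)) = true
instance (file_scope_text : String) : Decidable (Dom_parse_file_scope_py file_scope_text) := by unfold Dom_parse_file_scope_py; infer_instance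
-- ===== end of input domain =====

-- B replaces A's single stateful scan with a two-pass pipeline (split into tagged
-- section blocks, then filter/map each block's bullets); objective: alternative decomposition.

inductive PvCat : Type
  | create
  | modify
  | protect
deriving DecidableEq, Repr

-- ===== PORT A =====
-- literal transliteration of A's loop body: state = (create, modify, protect, current)
def pvStepA (st : List String × List String × List String × Option PvCat) (line : String) :
    List String × List String × List String × Option PvCat :=
  let cr := st.1; let mo := st.2.1; let pr := st.2.2.1; let cur := st.2.2.2
  let stripped := PySem.Str.strip line
  let low := PySem.Str.lower stripped
  if PySem.Str.startswith low "### create" then (cr, mo, pr, some PvCat.create)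
  else if PySem.Str.startswith low "### modify" then (cr, mo, pr, some PvCat.modify)
  else if PySem.Str.startswith low "### protect" then (cr, mo, pr, some PvCat.protect)
  else if PySem.Str.startswith stripped "- " then
    match cur with
    | none => (cr, mo, pr, cur)
    | some PvCat.create =>
        (cr ++ [PySem.Str.strip (PySem.Str.slice stripped (some 2) none)], mo, pr, cur)
    | some PvCat.modify =>
        (cr, mo ++ [PySem.Str.strip (PySem.Str.slice stripped (some 2) none)], pr, cur)
    | some PvCat.protect =>
        (cr, mo, pr ++ [PySem.Str.strip (PySem.Str.slice stripped (some 2) none)], cur)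
  else (cr, mo, pr, cur)

-- A's single loop over the lines
def parse_file_scope_py (file_scope_text : String) : List String × List String × List String :=
  let fin : List String × List String × List String × Option PvCat :=
    ((PySem.Str.split? file_scope_text "\n").getD []).foldl pvStepA
      ([], [], [], (none : Option PvCat))
  (fin.1, fin.2.1, fin.2.2.1)

-- ===== PORT B =====
-- the header table of Source B
def pvHeaders : List (String × PvCat) :=
  [("### create", PvCat.create), ("### modify", PvCat.modify), ("### protect", PvCat.protect)]

-- 'next((t for h, t in headers if low.startswith(h)), None)'
def pvHeaderTag (low : String) : Option PvCat :=
  (pvHeaders.find? (fun ht => PySem.Str.startswith low ht.1)).map (·.2)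

-- pass 1 of Source B: split lines into tagged blocks
def pvStep1 (blocks : List (PvCat × List String)) (line : String) : List (PvCat × List String) :=
  let stripped := PySem.Str.strip line
  match pvHeaderTag (PySem.Str.lower stripped) with
  | some t => blocks ++ [(t, [])]
  | none =>
      match blocks.getLast? with
      | none => blocks
      | some (t, ls) => blocks.dropLast ++ [(t, ls ++ [stripped])]

def pvPass1 (lines : List String) : List (PvCat × List String) :=
  lines.foldl pvStep1 []

-- the bullet comprehension of pass 2
def pvExtract (ls : List String) : List String :=
  (ls.filter (fun s => PySem.Str.startswith s "- ")).map
    (fun s => PySem.Str.strip (PySem.Str.slice s (some 2) none))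

-- pass 2 of Source B: extend the matching result list with each block's bullets
def pvStep2 (res : List String × List String × List String) (blk : PvCat × List String) :
    List String × List String × List String :=
  match blk.1 with
  | PvCat.create => (res.1 ++ pvExtract blk.2, res.2.1, res.2.2)
  | PvCat.modify => (res.1, res.2.1 ++ pvExtract blk.2, res.2.2)
  | PvCat.protect => (res.1, res.2.1, res.2.2 ++ pvExtract blk.2)

def parse_file_scope_py_alt (file_scope_text : String) : List String × List String × List String :=
  (pvPass1 ((PySem.Str.split? file_scope_text "\n").getD [])).foldl pvStep2 ([], [], [])

-- ===== PRECONDITION & SPEC =====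
def Spec_parse_file_scope_py (file_scope_text : String) (out : List String × List String × List String) : Prop := out = parse_file_scope_py_alt file_scope_text
instance (file_scope_text : String) (out : List String × List String × List String) : Decidable (Spec_parse_file_scope_py file_scope_text out) := by unfold Spec_parse_file_scope_py; infer_instance

-- ===== CLAIM (what is proved, stated in full; the proofs are below) =====
def Claim_equal_parse_file_scope_py : Prop := ∀ (file_scope_text : String), Dom_parse_file_scope_py file_scope_text → Spec_parse_file_scope_py file_scope_text (parse_file_scope_py file_scope_text)

-- ===== LEMMAS AND PROOFS =====

-- tagged bullet items of the remaining lines, given the current section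
def pvItems : List String → Option PvCat → List (PvCat × String)
  | [], _ => []
  | l :: ls, cur =>
    let s := PySem.Str.strip l
    let low := PySem.Str.lower s
    if PySem.Str.startswith low "### create" then pvItems ls (some PvCat.create)
    else if PySem.Str.startswith low "### modify" then pvItems ls (some PvCat.modify)
    else if PySem.Str.startswith low "### protect" then pvItems ls (some PvCat.protect)
    else if PySem.Str.startswith s "- " then
      match cur with
      | none => pvItems ls none
      | some t => (t, PySem.Str.strip (PySem.Str.slice s (some 2) none)) :: pvItems ls (some t)
    else pvItems ls cur

-- the current section after scanning the lines
def pvCurAfter : List String → Option PvCat → Option PvCat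
  | [], cur => cur
  | l :: ls, cur =>
    let low := PySem.Str.lower (PySem.Str.strip l)
    if PySem.Str.startswith low "### create" then pvCurAfter ls (some PvCat.create)
    else if PySem.Str.startswith low "### modify" then pvCurAfter ls (some PvCat.modify)
    else if PySem.Str.startswith low "### protect" then pvCurAfter ls (some PvCat.protect)
    else pvCurAfter ls cur

def pvSel (t : PvCat) (its : List (PvCat × String)) : List String :=
  (its.filter (fun it => it.1 = t)).map (·.2)

def pvTagAll (t : PvCat) (ls : List String) : List (PvCat × String) :=
  (pvExtract ls).map (fun s => (t, s))

lemma pvSel_append (t : PvCat) (a b : List (PvCat × String)) :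
    pvSel t (a ++ b) = pvSel t a ++ pvSel t b := by
  simp [pvSel]

lemma pvSel_tagAll (t u : PvCat) (ls : List String) :
    pvSel t (pvTagAll u ls) = if u = t then pvExtract ls else [] := by
  by_cases hu : u = t <;>
    simp [pvSel, pvTagAll, List.filter_map, hu, Function.comp]

-- A's fold, characterised: accumulators ++ selected items, cursor = pvCurAfter
lemma foldA_eq (lines : List String) :
    ∀ (cr mo pr : List String) (cur : Option PvCat),
    lines.foldl pvStepA (cr, mo, pr, cur)
      = (cr ++ pvSel PvCat.create (pvItems lines cur),
         mo ++ pvSel PvCat.modify (pvItems lines cur),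
         pr ++ pvSel PvCat.protect (pvItems lines cur),
         pvCurAfter lines cur) := by
  induction lines with
  | nil => intro cr mo pr cur; simp [pvItems, pvCurAfter, pvSel]
  | cons l ls ih =>
    intro cr mo pr cur
    simp only [List.foldl_cons, pvStepA]
    by_cases h1 : PySem.Str.startswith (PySem.Str.lower (PySem.Str.strip l)) "### create" = true
    all_goals simp at h1
    · simp [pvItems, pvCurAfter, h1, ih]
    · by_cases h2 : PySem.Str.startswith (PySem.Str.lower (PySem.Str.strip l)) "### modify" = true
      all_goals simp at h2
      · simp [pvItems, pvCurAfter, h1, h2, ih]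
      · by_cases h3 : PySem.Str.startswith (PySem.Str.lower (PySem.Str.strip l)) "### protect" = true
        all_goals simp at h3
        · simp [pvItems, pvCurAfter, h1, h2, h3, ih]
        · by_cases h4 : PySem.Str.startswith (PySem.Str.strip l) "- " = true
          all_goals simp at h4
          · cases cur with
            | none => simp [pvItems, pvCurAfter, h1, h2, h3, h4, ih]
            | some t =>
              cases t <;>
                simp [pvItems, pvCurAfter, pvSel, h1, h2, h3, h4, ih, List.append_assoc]
          · simp [pvItems, pvCurAfter, h1, h2, h3, h4, ih]

-- pvHeaderTag unfolded on the literal table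
lemma pvHeaderTag_eq (low : String) :
    pvHeaderTag low =
      (if PySem.Str.startswith low "### create" then some PvCat.create
       else if PySem.Str.startswith low "### modify" then some PvCat.modify
       else if PySem.Str.startswith low "### protect" then some PvCat.protect
       else none) := by
  simp [pvHeaderTag, pvHeaders, List.find?]
  split_ifs <;> simp_all

def pvBlockItems (blocks : List (PvCat × List String)) : List (PvCat × String) :=
  blocks.flatMap (fun blk => pvTagAll blk.1 blk.2)

lemma pvPass1_inv (lines : List String) :
    ∀ (blocks : List (PvCat × List String)) (t : PvCat) (ls : List String),
    pvBlockItems (lines.foldl pvStep1 (blocks ++ [(t, ls)]))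
    = pvBlockItems blocks ++ pvTagAll t ls ++ pvItems lines (some t) := by
  induction lines with
  | nil => intro blocks t ls; simp [pvBlockItems, pvItems]
  | cons l ls' ih =>
    intro blocks t ls
    simp only [List.foldl_cons, pvStep1, pvHeaderTag_eq]
    by_cases h1 : PySem.Str.startswith (PySem.Str.lower (PySem.Str.strip l)) "### create" = true
    all_goals (have h1' := h1; simp at h1')
    · simp only [h1, Bool.false_eq_true, if_true, if_false, reduceIte]
      rw [ih]
      simp [pvItems, pvBlockItems, pvTagAll, pvExtract, h1, h1', List.append_assoc]
    · by_cases h2 : PySem.Str.startswith (PySem.Str.lower (PySem.Str.strip l)) "### modify" = true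
      all_goals (have h2' := h2; simp at h2')
      · simp only [h1, h2, Bool.false_eq_true, if_true, if_false, reduceIte]
        rw [ih]
        simp [pvItems, pvBlockItems, pvTagAll, pvExtract, h1, h1', h2, h2', List.append_assoc]
      · by_cases h3 : PySem.Str.startswith (PySem.Str.lower (PySem.Str.strip l)) "### protect" = true
        all_goals (have h3' := h3; simp at h3')
        · simp only [h1, h2, h3, Bool.false_eq_true, if_true, if_false, reduceIte]
          rw [ih]
          simp [pvItems, pvBlockItems, pvTagAll, pvExtract, h1, h1', h2, h2', h3, h3', List.append_assoc]
        · simp only [h1, h2, h3, Bool.false_eq_true, if_true, if_false, reduceIte, List.getLast?_concat, List.dropLast_concat]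
          rw [ih]
          by_cases h4 : PySem.Str.startswith (PySem.Str.strip l) "- " = true
          all_goals (have h4' := h4; simp at h4')
          · simp [pvItems, pvTagAll, pvExtract, h1', h2', h3', h4', List.filter_append, List.append_assoc]
          · simp [pvItems, pvTagAll, pvExtract, h1', h2', h3', h4', List.filter_append]

set_option maxHeartbeats 1000000 in
lemma pvPass1_nil (lines : List String) :
    pvBlockItems (pvPass1 lines) = pvItems lines none := by
  induction lines with
  | nil => simp [pvPass1, pvBlockItems, pvItems]
  | cons l ls' ih =>
    unfold pvPass1 at ih ⊢
    simp only [List.foldl_cons, pvStep1, pvHeaderTag_eq]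
    by_cases h1 : PySem.Str.startswith (PySem.Str.lower (PySem.Str.strip l)) "### create" = true
    all_goals (have h1' := h1; simp at h1')
    · simp only [h1, Bool.false_eq_true, if_true, if_false, reduceIte]
      have key := pvPass1_inv ls' [] PvCat.create []
      rw [key]
      simp [pvBlockItems, pvTagAll, pvExtract, pvItems, h1']
    · by_cases h2 : PySem.Str.startswith (PySem.Str.lower (PySem.Str.strip l)) "### modify" = true
      all_goals (have h2' := h2; simp at h2')
      · simp only [h1, h2, Bool.false_eq_true, if_true, if_false, reduceIte]
        have key := pvPass1_inv ls' [] PvCat.modify []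
        rw [key]
        simp [pvBlockItems, pvTagAll, pvExtract, pvItems, h1', h2']
      · by_cases h3 : PySem.Str.startswith (PySem.Str.lower (PySem.Str.strip l)) "### protect" = true
        all_goals (have h3' := h3; simp at h3')
        · simp only [h1, h2, h3, Bool.false_eq_true, if_true, if_false, reduceIte]
          have key := pvPass1_inv ls' [] PvCat.protect []
          rw [key]
          simp [pvBlockItems, pvTagAll, pvExtract, pvItems, h1', h2', h3']
        · simp only [h1, h2, h3, Bool.false_eq_true, if_true, if_false, reduceIte, List.getLast?_nil]
          rw [ih]
          by_cases h4 : PySem.Str.startswith (PySem.Str.strip l) "- " = true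
          all_goals (have h4' := h4; simp at h4')
          · simp [pvItems, h1', h2', h3', h4']
          · simp [pvItems, h1', h2', h3', h4']

lemma foldB_eq (blocks : List (PvCat × List String)) :
    ∀ (cr mo pr : List String),
    blocks.foldl pvStep2 (cr, mo, pr)
      = (cr ++ pvSel PvCat.create (pvBlockItems blocks),
         mo ++ pvSel PvCat.modify (pvBlockItems blocks),
         pr ++ pvSel PvCat.protect (pvBlockItems blocks)) := by
  induction blocks with
  | nil => simp [pvBlockItems, pvSel]
  | cons b bs ih =>
    intro cr mo pr
    obtain ⟨t, ls⟩ := b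
    cases t <;>
      simp [pvStep2, pvBlockItems, List.flatMap_cons, pvSel_append, pvSel_tagAll, ih,
        List.append_assoc]

-- ===== VERDICT (by name: the statement is the Claim_ definition above) =====
theorem parse_file_scope_py_spec : Claim_equal_parse_file_scope_py := by
  intro t _
  unfold Spec_parse_file_scope_py parse_file_scope_py parse_file_scope_py_alt
  rw [foldB_eq, pvPass1_nil, foldA_eq]
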